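-- pv_equiv track=rewrite | github.com/lovelaced/hardiness | main.py | divide_station_line
-- ===== SOURCE A (Python) =====
-- def divide_station_line(line):
--     line_entry = []
--     line_entry.append(line[0:7])
--     line_entry.append(line[7:13])
--     line_entry.append(line[13:43])
--     line_entry.append(line[43:48])
--     line_entry.append(line[48:51])
--     line_entry.append(line[51:57])
--     line_entry.append(line[57:65])
--     line_entry.append(line[65:74])
--     line_entry.append(line[74:82])
--     line_entry.append(line[82:91])
--     line_entry.append(line[91:94])
--     for i in range(0, len(line_entry)-1):
--         line_entry[i] = line_entry[i].strip()
--     return line_entry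
-- ===== SOURCE B (Python) =====
-- def divide_station_line(line):
--     def peel(rest, widths):
--         head, tail = widths[0], widths[1:]
--         if not tail:
--             return [rest[:head]]
--         return [rest[:head].strip()] + peel(rest[head:], tail)
--     return peel(line, [7, 6, 30, 5, 3, 6, 8, 9, 8, 9, 3])
-- ===== Notes on version B (the rewrite author's own statement) =====
-- stated objective: alternative
-- what changed: Replaced eleven absolute-offset slices plus a separate in-place strip loop with a recursive peel that repeatedly splits off the next field from the remaining string (stripping it) and recurses on the rest, keeping the final field unstripped in the base case.
import Mathlib
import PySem

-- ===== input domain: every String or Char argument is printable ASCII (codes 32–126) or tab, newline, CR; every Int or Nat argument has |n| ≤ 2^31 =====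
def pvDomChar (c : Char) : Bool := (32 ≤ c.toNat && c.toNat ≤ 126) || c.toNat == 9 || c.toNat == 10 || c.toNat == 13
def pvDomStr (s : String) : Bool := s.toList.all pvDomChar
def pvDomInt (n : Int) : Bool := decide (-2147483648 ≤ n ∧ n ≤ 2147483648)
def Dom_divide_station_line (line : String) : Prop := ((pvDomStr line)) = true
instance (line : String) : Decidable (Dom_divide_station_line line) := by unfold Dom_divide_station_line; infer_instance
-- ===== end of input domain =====

-- B replaces the eleven absolute-offset slices plus a separate strip pass by a recursive peel
-- that consumes the remaining string width by width (objective: alternative decomposition).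

-- ===== PORT A =====
def divide_station_line (line : String) : List String :=
  let le : List String := []
  let le := le ++ [PySem.Str.slice line (some 0) (some 7)]
  let le := le ++ [PySem.Str.slice line (some 7) (some 13)]
  let le := le ++ [PySem.Str.slice line (some 13) (some 43)]
  let le := le ++ [PySem.Str.slice line (some 43) (some 48)]
  let le := le ++ [PySem.Str.slice line (some 48) (some 51)]
  let le := le ++ [PySem.Str.slice line (some 51) (some 57)]
  let le := le ++ [PySem.Str.slice line (some 57) (some 65)]
  let le := le ++ [PySem.Str.slice line (some 65) (some 74)]
  let le := le ++ [PySem.Str.slice line (some 74) (some 82)]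
  let le := le ++ [PySem.Str.slice line (some 82) (some 91)]
  let le := le ++ [PySem.Str.slice line (some 91) (some 94)]
  -- for i in range(0, len(line_entry)-1): line_entry[i] = line_entry[i].strip()
  -- (i is always in range here, so List.set is exact)
  (PySem.List.pyRange 0 ((le.length : Int) - 1) 1).foldl
    (fun acc i => acc.set i.toNat (PySem.Str.strip (acc.getD i.toNat ""))) le

-- ===== PORT B =====
-- peel(rest, widths): strip-and-cons the head field, recurse on the remaining string;
-- the last field (singleton widths) is kept unstripped.  Source B's peel is never called
-- with empty widths; the [] branch is only the match's totality case.
def pvPeel (rest : String) (widths : List Int) : List String :=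
  match widths with
  | [] => []
  | [w] => [PySem.Str.slice rest none (some w)]
  | w :: ws =>
      PySem.Str.strip (PySem.Str.slice rest none (some w))
        :: pvPeel (PySem.Str.slice rest (some w) none) ws

def divide_station_line_alt (line : String) : List String :=
  pvPeel line [7, 6, 30, 5, 3, 6, 8, 9, 8, 9, 3]

-- ===== PRECONDITION & SPEC =====
def Spec_divide_station_line (line : String) (out : List String) : Prop := out = divide_station_line_alt line
instance (line : String) (out : List String) : Decidable (Spec_divide_station_line line out) := by unfold Spec_divide_station_line; infer_instance

-- ===== CLAIM =====
def Claim_equal_divide_station_line : Prop := ∀ (line : String), Dom_divide_station_line line → Spec_divide_station_line line (divide_station_line line)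

-- ===== LEMMAS AND PROOFS =====

-- s[a:][b:] = s[a+b:]  (nonnegative bounds)
theorem pv_slice_from_from (s : String) (a b c : Int) (ha : 0 ≤ a) (hb : 0 ≤ b)
    (hc : a + b = c) :
    PySem.Str.slice (PySem.Str.slice s (some a) none) (some b) none
      = PySem.Str.slice s (some c) none := by
  subst hc
  simp only [PySem.Str.slice, PySem.Chars.slice_eq_listSlice, String.toList_ofList,
             PySem.List.slice_from _ ha, PySem.List.slice_from _ hb,
             PySem.List.slice_from _ (by omega : (0:Int) ≤ a + b), List.drop_drop]
  congr 2
  omega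

-- s[a:][:n] = s[a:a+n]  (nonnegative bounds)
theorem pv_slice_from_to (s : String) (a n c : Int) (ha : 0 ≤ a) (hn : 0 ≤ n)
    (hc : a + n = c) :
    PySem.Str.slice (PySem.Str.slice s (some a) none) none (some n)
      = PySem.Str.slice s (some a) (some c) := by
  subst hc
  simp only [PySem.Str.slice, PySem.Chars.slice_eq_listSlice, String.toList_ofList,
             PySem.List.slice_from _ ha, PySem.List.slice_to _ hn,
             PySem.List.slice_toNat _ ha (by omega : (0:Int) ≤ a + n)]
  congr 2
  omega

-- s[0:b] = s[:b]
theorem pv_slice_zero (s : String) (b? : Option Int) :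
    PySem.Str.slice s (some 0) b? = PySem.Str.slice s none b? := by
  simp only [PySem.Str.slice, PySem.Chars.slice_eq_listSlice, PySem.List.slice_zero_start]

-- A's port, evaluated: ten stripped fixed slices and the raw last slice
theorem pv_A_eval (line : String) : divide_station_line line =
    [PySem.Str.strip (PySem.Str.slice line (some 0) (some 7)),
     PySem.Str.strip (PySem.Str.slice line (some 7) (some 13)),
     PySem.Str.strip (PySem.Str.slice line (some 13) (some 43)),
     PySem.Str.strip (PySem.Str.slice line (some 43) (some 48)),
     PySem.Str.strip (PySem.Str.slice line (some 48) (some 51)),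
     PySem.Str.strip (PySem.Str.slice line (some 51) (some 57)),
     PySem.Str.strip (PySem.Str.slice line (some 57) (some 65)),
     PySem.Str.strip (PySem.Str.slice line (some 65) (some 74)),
     PySem.Str.strip (PySem.Str.slice line (some 74) (some 82)),
     PySem.Str.strip (PySem.Str.slice line (some 82) (some 91)),
     PySem.Str.slice line (some 91) (some 94)] := by
  unfold divide_station_line
  simp only [List.nil_append, List.cons_append, List.length_cons, List.length_nil]
  simp
  rw [show PySem.List.pyRange 0 10 1 = [0,1,2,3,4,5,6,7,8,9] from by decide]
  simp

-- B's port, evaluated: the nested peel written out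
theorem pv_B_eval (line : String) : divide_station_line_alt line =
    (let r1 := PySem.Str.slice line (some 7) none
     let r2 := PySem.Str.slice r1 (some 6) none
     let r3 := PySem.Str.slice r2 (some 30) none
     let r4 := PySem.Str.slice r3 (some 5) none
     let r5 := PySem.Str.slice r4 (some 3) none
     let r6 := PySem.Str.slice r5 (some 6) none
     let r7 := PySem.Str.slice r6 (some 8) none
     let r8 := PySem.Str.slice r7 (some 9) none
     let r9 := PySem.Str.slice r8 (some 8) none
     let r10 := PySem.Str.slice r9 (some 9) none
     [PySem.Str.strip (PySem.Str.slice line none (some 7)),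
      PySem.Str.strip (PySem.Str.slice r1 none (some 6)),
      PySem.Str.strip (PySem.Str.slice r2 none (some 30)),
      PySem.Str.strip (PySem.Str.slice r3 none (some 5)),
      PySem.Str.strip (PySem.Str.slice r4 none (some 3)),
      PySem.Str.strip (PySem.Str.slice r5 none (some 6)),
      PySem.Str.strip (PySem.Str.slice r6 none (some 8)),
      PySem.Str.strip (PySem.Str.slice r7 none (some 9)),
      PySem.Str.strip (PySem.Str.slice r8 none (some 8)),
      PySem.Str.strip (PySem.Str.slice r9 none (some 9)),
      PySem.Str.slice r10 none (some 3)]) := rfl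

-- ===== VERDICT =====
theorem divide_station_line_spec : Claim_equal_divide_station_line := by
  intro line _
  unfold Spec_divide_station_line
  rw [pv_A_eval, pv_B_eval]
  simp only []
  rw [pv_slice_from_from line 7 6 13 (by omega) (by omega) (by decide),
      pv_slice_from_from line 13 30 43 (by omega) (by omega) (by decide),
      pv_slice_from_from line 43 5 48 (by omega) (by omega) (by decide),
      pv_slice_from_from line 48 3 51 (by omega) (by omega) (by decide),
      pv_slice_from_from line 51 6 57 (by omega) (by omega) (by decide),
      pv_slice_from_from line 57 8 65 (by omega) (by omega) (by decide),
      pv_slice_from_from line 65 9 74 (by omega) (by omega) (by decide),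
      pv_slice_from_from line 74 8 82 (by omega) (by omega) (by decide),
      pv_slice_from_from line 82 9 91 (by omega) (by omega) (by decide),
      pv_slice_from_to line 7 6 13 (by omega) (by omega) (by decide),
      pv_slice_from_to line 13 30 43 (by omega) (by omega) (by decide),
      pv_slice_from_to line 43 5 48 (by omega) (by omega) (by decide),
      pv_slice_from_to line 48 3 51 (by omega) (by omega) (by decide),
      pv_slice_from_to line 51 6 57 (by omega) (by omega) (by decide),
      pv_slice_from_to line 57 8 65 (by omega) (by omega) (by decide),
      pv_slice_from_to line 65 9 74 (by omega) (by omega) (by decide),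
      pv_slice_from_to line 74 8 82 (by omega) (by omega) (by decide),
      pv_slice_from_to line 82 9 91 (by omega) (by omega) (by decide),
      pv_slice_from_to line 91 3 94 (by omega) (by omega) (by decide),
      pv_slice_zero line]
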